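-- pv_equiv track=rewrite | github.com/StrongDeutan/KRAFTON_Jungle_PS | week02/10000.py | stk_pop
-- ===== SOURCE A (Python) =====
-- def stk_pop(sub_stk: list):
--     re = sub_stk.pop()
--     val = 0
--     total = re[1] - re[0]
--     while(len(sub_stk) > 1):
--         c = sub_stk.pop()
--         total += c[1] - c[0]
--     if(len(sub_stk) != 0 and total == sub_stk[0][1] - sub_stk[0][0]):
--         val += 1
--         sub_stk.pop()
--     sub_stk.append(re)
--     return val
-- ===== SOURCE B (Python) =====
-- def stk_pop(sub_stk: list):
--     last = sub_stk.pop()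
--     total = (last[1] - last[0]) + sum(b - a for a, b in sub_stk[1:])
--     if sub_stk and total == sub_stk[0][1] - sub_stk[0][0]:
--         sub_stk[:] = [last]
--         return 1
--     sub_stk[:] = sub_stk[:1] + [last]
--     return 0
-- ===== Notes on version B (the rewrite author's own statement) =====
-- stated objective: simpler
-- what changed: Replaces A's destructive while-loop drain of the stack with a single comprehension-sum over sub_stk[1:] plus one pop, rebuilding the final stack by slice assignment instead of repeated pop/append.
-- outside the precondition, e.g. on stk_pop([]): A raises IndexError, B raises IndexError
import Mathlib
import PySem

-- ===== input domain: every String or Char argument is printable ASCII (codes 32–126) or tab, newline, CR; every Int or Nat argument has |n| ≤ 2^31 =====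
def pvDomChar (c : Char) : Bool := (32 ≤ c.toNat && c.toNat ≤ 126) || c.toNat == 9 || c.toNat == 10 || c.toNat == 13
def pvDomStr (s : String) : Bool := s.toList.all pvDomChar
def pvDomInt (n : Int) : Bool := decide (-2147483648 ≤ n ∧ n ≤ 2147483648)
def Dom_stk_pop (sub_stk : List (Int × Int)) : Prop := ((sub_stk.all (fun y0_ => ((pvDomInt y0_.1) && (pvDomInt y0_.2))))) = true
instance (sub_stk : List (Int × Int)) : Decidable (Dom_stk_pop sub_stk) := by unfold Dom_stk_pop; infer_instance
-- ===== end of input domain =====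

-- B replaces A's while-loop stack drain by one sum over sub_stk[1:]; equivalence is about the
-- RETURN value only (both Pythons mutate sub_stk in place, and B reproduces the same mutation).

-- ===== PORT A =====
-- 'while len(sub_stk) > 1: c = sub_stk.pop(); total += c[1] - c[0]' as structural recursion
def stkDrainA (stk : List (Int × Int)) (total : Int) : List (Int × Int) × Int :=
  if stk.length > 1 then
    match h : PySem.List.pop? stk (-1) with
    | some (c, rest) => stkDrainA rest (total + (c.2 - c.1))
    | none => (stk, total)
  else (stk, total)
termination_by stk.length
decreasing_by
  have := PySem.List.length_of_pop?_eq_some stk h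
  simp at this
  omega

def stk_pop (sub_stk : List (Int × Int)) : Int :=
  match PySem.List.pop? sub_stk (-1) with
  | none => 0   -- IndexError on the empty list; excluded by Pre_stk_pop
  | some (re, rest) =>
    let val : Int := 0
    let total : Int := re.2 - re.1
    let p := stkDrainA rest total
    -- if len(sub_stk) != 0 and total == sub_stk[0][1] - sub_stk[0][0]: val += 1
    match p.1 with
    | s0 :: _ => if p.2 = s0.2 - s0.1 then val + 1 else val
    | [] => val

-- ===== PORT B =====
def stk_pop_alt (sub_stk : List (Int × Int)) : Int :=
  match PySem.List.pop? sub_stk (-1) with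
  | none => 0   -- IndexError on the empty list; excluded by Pre_stk_pop
  | some (last, rest) =>
    let total : Int :=
      (last.2 - last.1) + ((PySem.List.slice rest (some 1) none).map (fun e => e.2 - e.1)).sum
    match rest with
    | r0 :: _ => if total = r0.2 - r0.1 then 1 else 0
    | [] => 0

-- ===== PRECONDITION & SPEC =====
-- A (and B) raise IndexError (pop from empty list) on []; Pre_ excludes exactly that input.
def Pre_stk_pop (sub_stk : List (Int × Int)) : Prop := sub_stk ≠ []
instance (sub_stk : List (Int × Int)) : Decidable (Pre_stk_pop sub_stk) := by
  unfold Pre_stk_pop; infer_instance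
def pvWitness_stk_pop : (List (Int × Int)) := [(0, 3), (0, 1), (0, 2)]

def Spec_stk_pop (sub_stk : List (Int × Int)) (out : Int) : Prop := out = stk_pop_alt sub_stk
instance (sub_stk : List (Int × Int)) (out : Int) : Decidable (Spec_stk_pop sub_stk out) := by
  unfold Spec_stk_pop; infer_instance

-- ===== CLAIM (what is proved, stated in full; the proofs are below) =====
def Claim_equal_stk_pop : Prop := ∀ (sub_stk : List (Int × Int)), Dom_stk_pop sub_stk → Pre_stk_pop sub_stk → Spec_stk_pop sub_stk (stk_pop sub_stk)

-- ===== LEMMAS AND PROOFS =====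

-- Characterisation of A's drain loop: the stack keeps its first element (if any) and
-- total gains the interval lengths of all elements after the first.
theorem stkDrainA_eq (stk : List (Int × Int)) :
    ∀ total : Int,
      stkDrainA stk total =
        (stk.take 1, total + ((stk.drop 1).map (fun e => e.2 - e.1)).sum) := by
  induction stk using List.reverseRecOn with
  | nil => intro t; rw [stkDrainA.eq_def]; simp
  | append_singleton xs a ih =>
    intro t
    cases xs with
    | nil => rw [stkDrainA.eq_def]; simp
    | cons x xs' =>
      rw [stkDrainA.eq_def]
      have hlen : (((x :: xs') ++ [a]).length > 1) := by simp
      rw [if_pos hlen, PySem.List.pop?_last]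
      simp only
      rw [ih]
      have h1 : ((x :: xs') ++ [a]).take 1 = (x :: xs').take 1 := by simp
      have h2 : ((x :: xs') ++ [a]).drop 1 = (x :: xs').drop 1 ++ [a] := by simp
      rw [h1, h2]
      simp
      ring

-- a non-empty list always pops
theorem pop?_ne_none (sub_stk : List (Int × Int)) (h : sub_stk ≠ []) :
    PySem.List.pop? sub_stk (-1) ≠ none := by
  induction sub_stk using List.reverseRecOn with
  | nil => exact absurd rfl h
  | append_singleton xs a _ => rw [PySem.List.pop?_last]; simp

theorem stk_pop_spec : Claim_equal_stk_pop := by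
  intro sub_stk _ hpre
  unfold Spec_stk_pop stk_pop stk_pop_alt
  cases hp : PySem.List.pop? sub_stk (-1) with
  | none => exact absurd hp (pop?_ne_none sub_stk hpre)
  | some r =>
    obtain ⟨re, rest⟩ := r
    simp only
    rw [stkDrainA_eq]
    cases rest with
    | nil => simp
    | cons r0 rs =>
      simp [PySem.List.slice_from_one]
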